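-- pv_equiv track=rewrite | github.com/Abhinash25/deadlock-prevention-and-recovery-toolkit | deadlock_gui.py | recover_deadlock
-- ===== SOURCE A (Python) =====
-- def recover_deadlock(allocation, available, deadlocked, strategy):
--     alloc = [row[:] for row in allocation]
--     avail = available[:]
--     nr = len(available)
--     steps = []
--     if strategy == 'terminate-all':
--         steps.append(f"Terminating all: {', '.join(deadlocked)}")
--         for pid in deadlocked:
--             idx = int(pid.replace('P', ''))
--             for j in range(nr):
--                 avail[j] += alloc[idx][j]
--                 alloc[idx][j] = 0
--             steps.append(f"{pid} terminated. Resources released.")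
--     elif strategy == 'terminate-one-by-one':
--         for pid in sorted(deadlocked, key=lambda p: sum(alloc[int(p.replace('P', ''))]), reverse=True):
--             idx = int(pid.replace('P', ''))
--             for j in range(nr):
--                 avail[j] += alloc[idx][j]
--                 alloc[idx][j] = 0
--             steps.append(f"{pid} terminated. Available: {avail}")
--     elif strategy == 'preemption':
--         remaining = list(deadlocked)
--         while remaining:
--             remaining.sort(key=lambda p: sum(alloc[int(p.replace('P', ''))]))
--             victim = remaining.pop(0)
--             vi = int(victim.replace('P', ''))
--             pre = alloc[vi][:]
--             for j in range(nr):
--                 avail[j] += alloc[vi][j]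
--                 alloc[vi][j] = 0
--             steps.append(f"Preempted {pre} from {victim}. Available: {avail}")
--             if remaining:
--                 if all(all(alloc[int(p.replace('P',''))][j] <= avail[j] for j in range(nr)) for p in remaining):
--                     steps.append(f"Deadlock resolved! {', '.join(remaining)} can proceed.")
--                     break
--     return steps, alloc
-- ===== SOURCE B (Python) =====
-- def recover_deadlock(allocation, available, deadlocked, strategy):
--     alloc = [row[:] for row in allocation]
--     avail = available[:]
--     nr = len(available)
--
--     def release(idx):
--         row = alloc[idx]
--         for j in range(nr):
--             avail[j] += row[j]
--             row[j] = 0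
--
--     if strategy == 'terminate-all':
--         steps = ["Terminating all: " + ', '.join(deadlocked)]
--         steps += [f"{pid} terminated. Resources released." for pid in deadlocked]
--         for pid in deadlocked:
--             release(int(pid.replace('P', '')))
--         return steps, alloc
--     steps = []
--     if strategy == 'terminate-one-by-one':
--         for pid in sorted(deadlocked, key=lambda p: sum(alloc[int(p.replace('P', ''))]), reverse=True):
--             release(int(pid.replace('P', '')))
--             steps.append(f"{pid} terminated. Available: {avail}")
--     elif strategy == 'preemption':
--         # sort the victims ONCE, ascending by allocation sum: a victim's row is only
--         # zeroed when it is removed, so the order A re-computes each round never changes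
--         order = sorted(deadlocked, key=lambda p: sum(alloc[int(p.replace('P', ''))]))
--         for k, victim in enumerate(order):
--             vi = int(victim.replace('P', ''))
--             pre = alloc[vi][:]
--             release(vi)
--             steps.append(f"Preempted {pre} from {victim}. Available: {avail}")
--             rest = order[k + 1:]
--             if rest and all(alloc[int(p.replace('P', ''))][j] <= avail[j]
--                             for p in rest for j in range(nr)):
--                 steps.append(f"Deadlock resolved! {', '.join(rest)} can proceed.")
--                 break
--     return steps, alloc
-- ===== Notes on version B (the rewrite author's own statement) =====
-- stated objective: alternative
-- what changed: The preemption loop no longer re-sorts the surviving victims every round: the victims are sorted once by allocation sum (invariant until a victim is removed) and the loop walks that order; terminate-all builds its state-independent messages up front, and terminate-one-by-one is an explicit recursion over the once-sorted order.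
import Mathlib
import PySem

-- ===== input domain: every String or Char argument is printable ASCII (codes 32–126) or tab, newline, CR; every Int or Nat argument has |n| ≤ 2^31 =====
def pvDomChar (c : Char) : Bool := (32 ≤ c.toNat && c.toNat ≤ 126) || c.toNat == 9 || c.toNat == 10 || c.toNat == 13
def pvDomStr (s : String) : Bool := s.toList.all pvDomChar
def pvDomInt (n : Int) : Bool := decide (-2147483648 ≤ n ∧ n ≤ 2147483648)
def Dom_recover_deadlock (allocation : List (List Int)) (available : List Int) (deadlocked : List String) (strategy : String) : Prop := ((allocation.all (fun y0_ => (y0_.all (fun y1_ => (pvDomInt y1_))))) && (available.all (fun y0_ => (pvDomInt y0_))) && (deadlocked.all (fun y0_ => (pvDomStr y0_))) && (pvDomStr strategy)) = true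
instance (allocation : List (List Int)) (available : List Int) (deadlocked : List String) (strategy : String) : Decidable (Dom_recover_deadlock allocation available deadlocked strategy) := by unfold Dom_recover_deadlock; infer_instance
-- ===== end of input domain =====

-- B replaces A's preemption loop, which re-sorts the surviving victims every round, by one
-- initial sort (the sums it orders by never change before a victim is removed); proved equal
-- outside Pre_'s exclusions.  Equality is about the RETURN value only (A mutates nothing visible).

-- ===== PORT A =====
-- shared helpers (the Python helpers/expressions both Source A and Source B contain)

-- int(p.replace('P', '')); int() raising ValueError is excluded by Pre_
def pvParse (p : String) : Int := (PySem.Int.ofStr? (PySem.Str.replace p "P" "")).getD 0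

-- str(xs) for a list of ints, e.g. "[1, -2]"
def pvRepr (xs : List Int) : String := "[" ++ PySem.Str.join ", " (xs.map PySem.Int.toStr) ++ "]"

-- for j in range(nr): avail[j] += row[j]; row[j] = 0
def pvRelease (nr : Int) (avail row : List Int) : List Int × List Int :=
  (PySem.List.pyRange 0 nr 1).foldl
    (fun st j =>
      (PySem.List.pySetD st.1 j (PySem.List.pyGetD st.1 j 0 + PySem.List.pyGetD st.2 j 0),
       PySem.List.pySetD st.2 j 0))
    (avail, row)

-- the release loop applied to row alloc[idx] (the row is written back once: Python mutates
-- the aliased row object) -- state is (avail, alloc)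
def pvReleaseAt (nr : Int) (st : List Int × List (List Int)) (idx : Int) :
    List Int × List (List Int) :=
  let r := pvRelease nr st.1 (PySem.List.pyGetD st.2 idx [])
  (r.1, PySem.List.pySetD st.2 idx r.2)

-- sort key: sum(alloc[int(p.replace('P',''))])
def pvKey (alloc : List (List Int)) (p : String) : Int :=
  (PySem.List.pyGetD alloc (pvParse p) []).sum

-- all(all(alloc[int(p...)][j] <= avail[j] for j in range(nr)) for p in rest)
def pvFeasible (nr : Int) (alloc : List (List Int)) (avail : List Int) (rest : List String) : Bool :=
  rest.all (fun p => (PySem.List.pyRange 0 nr 1).all (fun j =>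
    decide (PySem.List.pyGetD (PySem.List.pyGetD alloc (pvParse p) []) j 0
             ≤ PySem.List.pyGetD avail j 0)))

-- A's while-loop: re-sort the remaining victims each round, pop the minimum
def pvPreLoopA (nr : Int) (remaining : List String) (st : List Int × List (List Int))
    (steps : List String) : List String × List (List Int) :=
  match hs : PySem.List.sorted remaining (pvKey st.2) false with
  | [] => (steps, st.2)
  | victim :: rest =>
      let pre := PySem.List.pyGetD st.2 (pvParse victim) []
      let st' := pvReleaseAt nr st (pvParse victim)
      let steps' := steps ++
        ["Preempted " ++ pvRepr pre ++ " from " ++ victim ++ ". Available: " ++ pvRepr st'.1]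
      if rest ≠ [] ∧ pvFeasible nr st'.2 st'.1 rest then
        (steps' ++ ["Deadlock resolved! " ++ PySem.Str.join ", " rest ++ " can proceed."], st'.2)
      else pvPreLoopA nr rest st' steps'
termination_by remaining.length
decreasing_by
  have h := PySem.List.length_sorted (xs := remaining) (key := pvKey st.2) (rev := false)
  rw [hs] at h; simp at h; omega

def recover_deadlock (allocation : List (List Int)) (available : List Int)
    (deadlocked : List String) (strategy : String) : List String × List (List Int) :=
  let alloc := allocation     -- [row[:] for row in allocation]: copying is the identity here
  let avail := available      -- available[:]
  let nr := PySem.List.len available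
  if strategy = "terminate-all" then
    let fin := deadlocked.foldl
      (fun (st : (List Int × List (List Int)) × List String) pid =>
        (pvReleaseAt nr st.1 (pvParse pid),
         st.2 ++ [pid ++ " terminated. Resources released."]))
      ((avail, alloc), ["Terminating all: " ++ PySem.Str.join ", " deadlocked])
    (fin.2, fin.1.2)
  else if strategy = "terminate-one-by-one" then
    let fin := (PySem.List.sorted deadlocked (pvKey alloc) true).foldl
      (fun (st : (List Int × List (List Int)) × List String) pid =>
        let st' := pvReleaseAt nr st.1 (pvParse pid)
        (st', st.2 ++ [pid ++ " terminated. Available: " ++ pvRepr st'.1]))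
      ((avail, alloc), [])
    (fin.2, fin.1.2)
  else if strategy = "preemption" then
    pvPreLoopA nr deadlocked (avail, alloc) []
  else ([], alloc)

-- ===== PORT B =====

-- Source B's terminate-one-by-one for-loop (explicit recursion over the sorted order)
def pvTermLoopB (nr : Int) (order : List String) (st : List Int × List (List Int))
    (steps : List String) : List String × List (List Int) :=
  match order with
  | [] => (steps, st.2)
  | pid :: rest =>
      let st' := pvReleaseAt nr st (pvParse pid)
      pvTermLoopB nr rest st' (steps ++ [pid ++ " terminated. Available: " ++ pvRepr st'.1])

-- Source B's preemption for-loop over the once-sorted order; rest = order[k+1:]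
def pvPreLoopB (nr : Int) (order : List String) (st : List Int × List (List Int))
    (steps : List String) : List String × List (List Int) :=
  match order with
  | [] => (steps, st.2)
  | victim :: rest =>
      let pre := PySem.List.pyGetD st.2 (pvParse victim) []
      let st' := pvReleaseAt nr st (pvParse victim)
      let steps' := steps ++
        ["Preempted " ++ pvRepr pre ++ " from " ++ victim ++ ". Available: " ++ pvRepr st'.1]
      if rest ≠ [] ∧ pvFeasible nr st'.2 st'.1 rest then
        (steps' ++ ["Deadlock resolved! " ++ PySem.Str.join ", " rest ++ " can proceed."], st'.2)
      else pvPreLoopB nr rest st' steps'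

def recover_deadlock_alt (allocation : List (List Int)) (available : List Int)
    (deadlocked : List String) (strategy : String) : List String × List (List Int) :=
  let alloc := allocation
  let avail := available
  let nr := PySem.List.len available
  if strategy = "terminate-all" then
    -- messages are state-independent: build them up front, then run the releases
    let steps := ("Terminating all: " ++ PySem.Str.join ", " deadlocked) ::
      deadlocked.map (fun pid => pid ++ " terminated. Resources released.")
    let st := deadlocked.foldl (fun st pid => pvReleaseAt nr st (pvParse pid)) (avail, alloc)
    (steps, st.2)
  else if strategy = "terminate-one-by-one" then
    pvTermLoopB nr (PySem.List.sorted deadlocked (pvKey alloc) true) (avail, alloc) []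
  else if strategy = "preemption" then
    pvPreLoopB nr (PySem.List.sorted deadlocked (pvKey alloc) false) (avail, alloc) []
  else ([], alloc)

-- ===== PRECONDITION & SPEC =====

-- the row index Python resolves i to in a list of length n
def pvResIdx (n : Nat) (i : Int) : Int := if i < 0 then i + n else i

-- pid parses, names a row, and that row is at least as long as `available`
def pvPidOk (allocation : List (List Int)) (nr : Nat) (p : String) : Bool :=
  match PySem.Int.ofStr? (PySem.Str.replace p "P" "") with
  | none => false
  | some i => decide (PySem.Raise.InRange allocation.length i) &&
              decide (nr ≤ (PySem.List.pyGetD allocation i []).length)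

-- Pre_ excludes exactly (a) the inputs where A raises: under the three named strategies a pid
-- whose int() fails (ValueError), is out of range, or whose row is shorter than `available`
-- (IndexError); and (b) for 'preemption' only, lists naming the same row twice, on which the
-- order A's per-round re-sort emits after zeroing that row is accidental.
def Pre_recover_deadlock (allocation : List (List Int)) (available : List Int)
    (deadlocked : List String) (strategy : String) : Prop :=
  ((strategy = "terminate-all" ∨ strategy = "terminate-one-by-one" ∨ strategy = "preemption") →
     ∀ p ∈ deadlocked, pvPidOk allocation available.length p = true) ∧
  (strategy = "preemption" →
     List.Pairwise (fun p q =>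
       pvResIdx allocation.length (pvParse p) ≠ pvResIdx allocation.length (pvParse q)) deadlocked)

instance (allocation : List (List Int)) (available : List Int) (deadlocked : List String) (strategy : String) : Decidable (Pre_recover_deadlock allocation available deadlocked strategy) := by unfold Pre_recover_deadlock; infer_instance

def pvWitness_recover_deadlock : List (List Int) × List Int × List String × String :=
  ([[1], [2]], [0], ["P0", "P1"], "preemption")

def Spec_recover_deadlock (allocation : List (List Int)) (available : List Int) (deadlocked : List String) (strategy : String) (out : List String × List (List Int)) : Prop := out = recover_deadlock_alt allocation available deadlocked strategy
instance (allocation : List (List Int)) (available : List Int) (deadlocked : List String) (strategy : String) (out : List String × List (List Int)) : Decidable (Spec_recover_deadlock allocation available deadlocked strategy out) := by unfold Spec_recover_deadlock; infer_instance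

-- ===== CLAIM (what is proved, stated in full; the proofs are below) =====
def Claim_equal_recover_deadlock : Prop := ∀ (allocation : List (List Int)) (available : List Int) (deadlocked : List String) (strategy : String), Dom_recover_deadlock allocation available deadlocked strategy → Pre_recover_deadlock allocation available deadlocked strategy → Spec_recover_deadlock allocation available deadlocked strategy (recover_deadlock allocation available deadlocked strategy)

-- ===== LEMMAS AND PROOFS =====

-- an in-range index resolves to pvResIdx
lemma pvIdx_eq (n : Nat) (i : Int) (k : Nat) (h : PySem.List.pyIdx? n i = some k) :
    (k : Int) = pvResIdx n i := by
  simp [PySem.List.pyIdx?, pvResIdx] at h ⊢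
  split_ifs at h ⊢ <;> simp_all <;> omega

-- reading another row than the one pySetD wrote is reading the original list
lemma pvGetD_setD_ne (xs : List (List Int)) (i j : Int) (v : List Int)
    (h : pvResIdx xs.length i ≠ pvResIdx xs.length j) :
    PySem.List.pyGetD (PySem.List.pySetD xs i v) j [] = PySem.List.pyGetD xs j [] := by
  unfold PySem.List.pySetD PySem.List.pySet? PySem.List.pyGetD PySem.List.pyGet?
  cases hki : PySem.List.pyIdx? xs.length i with
  | none => simp
  | some ki =>
    have hki' := pvIdx_eq _ _ _ hki
    simp only [Option.map_some, Option.getD_some]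
    rw [List.length_set]
    cases hkj : PySem.List.pyIdx? xs.length j with
    | none => simp
    | some kj =>
      have hkj' := pvIdx_eq _ _ _ hkj
      have hne : ki ≠ kj := by intro e; apply h; rw [← hki', ← hkj', e]
      simp [List.getElem?_set_ne hne]

lemma pvReleaseAt_alloc_length (nr : Int) (st : List Int × List (List Int)) (idx : Int) :
    (pvReleaseAt nr st idx).2.length = st.2.length := by
  simp [pvReleaseAt, PySem.List.length_pySetD]

-- terminate-all: A's fold carrying the step list = B's prebuilt messages + state-only fold
lemma pvTermAll_eq (nr : Int) (ds : List String) (st : List Int × List (List Int))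
    (steps : List String) :
    ds.foldl
      (fun (st : (List Int × List (List Int)) × List String) pid =>
        (pvReleaseAt nr st.1 (pvParse pid), st.2 ++ [pid ++ " terminated. Resources released."]))
      (st, steps)
    = (ds.foldl (fun st pid => pvReleaseAt nr st (pvParse pid)) st,
       steps ++ ds.map (fun pid => pid ++ " terminated. Resources released.")) := by
  induction ds generalizing st steps with
  | nil => simp
  | cons d ds ih => simp [ih]

-- terminate-one-by-one: A's fold = B's recursion
lemma pvTermOne_eq (nr : Int) (order : List String) (st : List Int × List (List Int))
    (steps : List String) :
    (let fin := order.foldl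
      (fun (st : (List Int × List (List Int)) × List String) pid =>
        let st' := pvReleaseAt nr st.1 (pvParse pid)
        (st', st.2 ++ [pid ++ " terminated. Available: " ++ pvRepr st'.1]))
      (st, steps)
     (fin.2, fin.1.2))
    = pvTermLoopB nr order st steps := by
  induction order generalizing st steps with
  | nil => simp [pvTermLoopB]
  | cons d ds ih => simp only [List.foldl_cons, pvTermLoopB]; exact ih _ _

-- preemption: once the victims carry pairwise distinct rows, A's re-sort-every-round loop is
-- B's loop over the once-sorted order
lemma pvPreLoop_eq (nr : Int) (rem : List String) (st : List Int × List (List Int))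
    (steps : List String)
    (hdist : List.Pairwise (fun p q =>
      pvResIdx st.2.length (pvParse p) ≠ pvResIdx st.2.length (pvParse q)) rem) :
    pvPreLoopA nr rem st steps
      = pvPreLoopB nr (PySem.List.sorted rem (pvKey st.2) false) st steps := by
  induction hN : rem.length using Nat.strong_induction_on generalizing rem st steps with
  | _ N ih =>
  rw [pvPreLoopA]
  split
  next hs => rw [hs]; rfl
  next victim rest hs =>
    rw [hs]
    rw [pvPreLoopB]
    simp only []
    -- both bodies are literally the same computation; only the else-branch recursion differs
    have hperm : (victim :: rest).Perm rem := by
      rw [← hs]; exact PySem.List.sorted_perm rem (pvKey st.2) false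
    have hdist' : List.Pairwise (fun p q =>
        pvResIdx st.2.length (pvParse p) ≠ pvResIdx st.2.length (pvParse q)) (victim :: rest) :=
      (hperm.pairwise_iff (fun {_ _} h => Ne.symm h)).mpr hdist
    set st' := pvReleaseAt nr st (pvParse victim) with hst'
    split
    · rfl
    · -- else: A recurses on rest; B walks down the tail of the once-sorted order
      have hlen : st'.2.length = st.2.length := pvReleaseAt_alloc_length nr st (pvParse victim)
      have hkey : ∀ p ∈ rest, pvKey st'.2 p = pvKey st.2 p := by
        intro p hp
        have hne : pvResIdx st.2.length (pvParse victim) ≠ pvResIdx st.2.length (pvParse p) :=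
          (List.pairwise_cons.mp hdist').1 p hp
        rw [hst']
        simp only [pvKey, pvReleaseAt]
        rw [pvGetD_setD_ne _ _ _ _ hne]
      have hsorted_rest : PySem.List.sorted rest (pvKey st'.2) false = rest := by
        apply PySem.List.sorted_eq_self_of_pairwise
        have h1 : List.Pairwise (fun a b => pvKey st.2 a ≤ pvKey st.2 b) (victim :: rest) := by
          have := PySem.List.sorted_pairwise rem (pvKey st.2)
          rwa [hs] at this
        have h2 := (List.pairwise_cons.mp h1).2
        exact h2.imp_of_mem (fun {a b} ha hb hab => by rw [hkey a ha, hkey b hb]; exact hab)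
      have hrest_dist : List.Pairwise (fun p q =>
          pvResIdx st'.2.length (pvParse p) ≠ pvResIdx st'.2.length (pvParse q)) rest := by
        rw [hlen]; exact (List.pairwise_cons.mp hdist').2
      have hlt : rest.length < N := by
        have := hperm.length_eq; simp at this; omega
      rw [ih rest.length hlt rest st' _ hrest_dist rfl, hsorted_rest]

-- ===== VERDICT (by name: the statement is the Claim_ definition above) =====
theorem recover_deadlock_spec : Claim_equal_recover_deadlock := by
  intro allocation available deadlocked strategy _ hpre
  obtain ⟨_, hdist⟩ := hpre
  unfold Spec_recover_deadlock recover_deadlock recover_deadlock_alt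
  by_cases h1 : strategy = "terminate-all"
  · subst h1; simp [pvTermAll_eq]
  · by_cases h2 : strategy = "terminate-one-by-one"
    · subst h2; simp [← pvTermOne_eq]
    · by_cases h3 : strategy = "preemption"
      · subst h3
        have h := pvPreLoop_eq (PySem.List.len available) deadlocked (available, allocation) []
          (hdist rfl)
        simpa using h
      · simp [if_neg h1, if_neg h2, if_neg h3]
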